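-- pv_equiv track=rewrite | github.com/ChinomnsoC/data-structure-algorithms | string_manipulation/eliminating_substrings.py | eliminate_substring_variation
-- ===== SOURCE A (Python) =====
-- def eliminate_substring_variation(s: str, target: str) -> str:
--
--     stack = []
--     tgt_length = len(target)
--
--     for char in s:
--         stack.append(char)
--
--         if stack[-tgt_length:] == list(target):
--             # call stack.pop tgt_length number of times
--             for _ in range(tgt_length):
--                 stack.pop()
--     result = "".join(stack)
--
--     return result if result else "-1"
-- ===== SOURCE B (Python) =====
-- def eliminate_substring_variation(s: str, target: str) -> str:
--     # repeatedly delete the leftmost occurrence of target until none remains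
--     if target:
--         i = s.find(target)
--         while i != -1:
--             s = s[:i] + s[i + len(target):]
--             i = s.find(target)
--     return s if s else "-1"
-- ===== Notes on version B (the rewrite author's own statement) =====
-- stated objective: simpler
-- what changed: Replaced the one-pass character stack (push each char, compare the stack's tail slice to the target, pop on match) by a plain loop that repeatedly finds the leftmost occurrence with str.find and deletes it by slicing; equivalent because the stack never contains the target as a factor, so the stack's match is always the leftmost occurrence.
import Mathlib
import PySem

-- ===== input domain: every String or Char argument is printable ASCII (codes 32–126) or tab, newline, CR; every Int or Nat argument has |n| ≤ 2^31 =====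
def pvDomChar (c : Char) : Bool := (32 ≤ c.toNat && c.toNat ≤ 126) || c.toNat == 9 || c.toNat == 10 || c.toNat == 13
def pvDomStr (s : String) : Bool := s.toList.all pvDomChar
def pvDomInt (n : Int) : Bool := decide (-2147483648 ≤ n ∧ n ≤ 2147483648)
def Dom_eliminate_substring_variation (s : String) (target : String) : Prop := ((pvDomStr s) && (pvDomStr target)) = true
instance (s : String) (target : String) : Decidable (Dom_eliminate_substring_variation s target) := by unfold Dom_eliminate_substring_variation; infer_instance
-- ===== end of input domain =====

-- B replaces A's character stack by repeated leftmost-occurrence deletion (find + slice): simpler, same results.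

-- ===== PORT A =====
-- literal port: stack of chars; push; if stack[-len(target):] == list(target), pop len(target) times
-- (each stack.pop() is ported as dropLast; exact, since the branch guarantees the stack holds ≥ len(target) chars)
def eliminate_substring_variation (s : String) (target : String) : String :=
  let tgt := target.toList
  let tgtLength := tgt.length
  let stack := s.toList.foldl (fun stack char =>
    let stack := stack ++ [char]
    if PySem.List.slice stack (some (-(tgtLength : Int))) none = tgt then
      (List.range tgtLength).foldl (fun st _ => st.dropLast) stack
    else stack) []
  let result := String.ofList stack
  if result ≠ "" then result else "-1"

-- ===== PORT B =====
-- the while loop of Source B: i = s.find(target); while i != -1: s = s[:i] + s[i+len(target):]; i = s.find(target)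
-- (the hypothesis htgt is Source B's guard 'if target:', which is what makes the while loop terminate)
def pvElimLoop (tgt : List Char) (htgt : tgt ≠ []) (l : List Char) : List Char :=
  let i := PySem.Chars.find l tgt
  if hi : i = -1 then l
  else pvElimLoop tgt htgt
    (PySem.List.slice l none (some i) ++ PySem.List.slice l (some (i + (tgt.length : Int))) none)
termination_by l.length
decreasing_by
  have hinf : tgt <:+: l := (PySem.Chars.find_ne_neg_one_iff l tgt).mp hi
  have h0 : 0 ≤ PySem.Chars.find l tgt := (PySem.Chars.find_nonneg_iff l tgt).mpr hinf
  obtain ⟨hpre, -⟩ := PySem.Chars.find_spec h0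
  have hm : 0 < tgt.length := List.length_pos_iff.mpr htgt
  have hlen : (PySem.Chars.find l tgt).toNat + tgt.length ≤ l.length := by
    have := hpre.length_le
    simp only [List.length_drop] at this
    omega
  rw [PySem.List.slice_to _ h0, PySem.List.slice_from _ (by omega : (0:Int) ≤ PySem.Chars.find l tgt + (tgt.length : Int))]
  have hcast : ((PySem.Chars.find l tgt) + (tgt.length : Int)).toNat
       = (PySem.Chars.find l tgt).toNat + tgt.length := by omega
  rw [hcast]
  simp only [List.length_append, List.length_take, List.length_drop]
  omega

def eliminate_substring_variation_alt (s : String) (target : String) : String :=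
  let res := if h : target.toList = [] then s.toList else pvElimLoop target.toList h s.toList
  if res ≠ [] then String.ofList res else "-1"

-- ===== PRECONDITION & SPEC =====
def Spec_eliminate_substring_variation (s : String) (target : String) (out : String) : Prop := out = eliminate_substring_variation_alt s target
instance (s : String) (target : String) (out : String) : Decidable (Spec_eliminate_substring_variation s target out) := by unfold Spec_eliminate_substring_variation; infer_instance

-- ===== CLAIM (what is proved, stated in full; the proofs are below) =====
def Claim_equal_eliminate_substring_variation : Prop := ∀ (s : String) (target : String), Dom_eliminate_substring_variation s target → Spec_eliminate_substring_variation s target (eliminate_substring_variation s target)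

-- ===== LEMMAS AND PROOFS =====

-- canonical form of A's loop body (for tgt ≠ [])
def pvStepL (tgt : List Char) (st : List Char) (c : Char) : List Char :=
  if (st ++ [c]).drop ((st ++ [c]).length - tgt.length) = tgt then
    (st ++ [c]).take ((st ++ [c]).length - tgt.length)
  else st ++ [c]

theorem pv_pop_loop (m : Nat) (st : List Char) :
    (List.range m).foldl (fun a _ => a.dropLast) st = st.take (st.length - m) := by
  induction m with
  | zero => simp
  | succ n ih =>
    rw [List.range_succ, List.foldl_append, ih]
    simp only [List.foldl_cons, List.foldl_nil, List.dropLast_eq_take, List.take_take,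
      List.length_take]
    congr 1
    omega

theorem pv_stepA_eq (tgt : List Char) (htgt : tgt ≠ []) :
    (fun (stack : List Char) (char : Char) =>
      let stack := stack ++ [char]
      if PySem.List.slice stack (some (-(tgt.length : Int))) none = tgt then
        (List.range tgt.length).foldl (fun st _ => st.dropLast) stack
      else stack) = pvStepL tgt := by
  funext st c
  have hm : 0 < tgt.length := List.length_pos_iff.mpr htgt
  simp only [pvStepL, PySem.List.slice_from_neg_natCast _ _ hm, pv_pop_loop]

theorem pv_infix_concat {tgt st : List Char} {c : Char} (h : tgt <:+: st ++ [c]) :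
    tgt <:+: st ∨ (st ++ [c]).drop ((st ++ [c]).length - tgt.length) = tgt := by
  obtain ⟨u, v, huv⟩ := h
  rcases v.eq_nil_or_concat with rfl | ⟨v', c', rfl⟩
  · right
    simp only [List.append_nil] at huv
    rw [← huv]
    simp only [List.length_append]
    have hu : u.length + tgt.length - tgt.length = u.length := by omega
    rw [hu, List.drop_left]
  · left
    have h1 : (u ++ tgt ++ v') ++ [c'] = st ++ [c] := by simpa using huv
    have h2 := List.append_inj' h1 (by rfl)
    exact ⟨u, v', by rw [h2.1]⟩

theorem pv_step_noOcc {tgt st : List Char} (htgt : tgt ≠ []) (hno : ¬ tgt <:+: st) (c : Char) :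
    ¬ tgt <:+: pvStepL tgt st c := by
  unfold pvStepL
  split_ifs with hcond
  · intro hbad
    have hm : 0 < tgt.length := List.length_pos_iff.mpr htgt
    have hpre : (st ++ [c]).take ((st ++ [c]).length - tgt.length) <+: st := by
      have hle : (st ++ [c]).length - tgt.length ≤ st.length := by
        simp only [List.length_append, List.length_cons, List.length_nil]
        omega
      rw [List.take_append_of_le_length hle]
      exact List.take_prefix _ _
    exact hno (hbad.trans hpre.isInfix)
  · intro hbad
    rcases pv_infix_concat hbad with h | h
    · exact hno h
    · exact hcond h

theorem pv_prefix_drop_infix {tgt X : List Char} (f : Nat) (h : tgt <+: X.drop f) : tgt <:+: X :=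
  h.isInfix.trans (List.drop_suffix f X).isInfix

theorem pv_find_concat (p tgt r : List Char) (htgt : tgt ≠ [])
    (hno : ¬ tgt <:+: (p ++ tgt).dropLast) :
    PySem.Chars.find (p ++ tgt ++ r) tgt = (p.length : Int) := by
  have hm : 0 < tgt.length := List.length_pos_iff.mpr htgt
  set l := p ++ tgt ++ r with hl
  have hocc : tgt <+: l.drop p.length := by
    rw [hl, List.append_assoc, List.drop_left]
    exact List.prefix_append tgt r
  have hinf : tgt <:+: l := pv_prefix_drop_infix p.length hocc
  have h0 : 0 ≤ PySem.Chars.find l tgt := (PySem.Chars.find_nonneg_iff l tgt).mpr hinf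
  obtain ⟨hpre, hmin⟩ := PySem.Chars.find_spec h0
  set f := (PySem.Chars.find l tgt).toNat with hf
  have hfle : f ≤ p.length := by
    by_contra hgt
    exact hmin p.length (by omega) hocc
  have hfeq : f = p.length := by
    by_contra hne
    have hflt : f < p.length := by omega
    apply hno
    obtain ⟨w, hw⟩ := hpre
    have hK : (p ++ tgt).dropLast = l.take (p.length + tgt.length - 1) := by
      rw [hl, List.take_append_of_le_length (by simp only [List.length_append]; omega), List.dropLast_eq_take]
      simp
    apply pv_prefix_drop_infix f
    rw [hK, List.drop_take]
    refine ⟨w.take (p.length + tgt.length - 1 - f - tgt.length), ?_⟩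
    rw [← hw, List.take_append, List.take_of_length_le (show tgt.length ≤ p.length + tgt.length - 1 - f by omega)]
  omega

-- one unfolding of B's loop at a known leftmost occurrence
theorem pv_elimLoop_step (tgt : List Char) (htgt : tgt ≠ []) (p r : List Char)
    (hno : ¬ tgt <:+: (p ++ tgt).dropLast) :
    pvElimLoop tgt htgt (p ++ tgt ++ r) = pvElimLoop tgt htgt (p ++ r) := by
  rw [pvElimLoop.eq_def]
  have hfind := pv_find_concat p tgt r htgt hno
  simp only [hfind]
  rw [dif_neg (by omega)]
  have hc : (p.length : Int) + (tgt.length : Int) = ((p.length + tgt.length : Nat) : Int) := by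
    omega
  rw [hc, PySem.List.slice_to_natCast, PySem.List.slice_from_natCast]
  have h1 : (p ++ tgt ++ r).take p.length = p := by
    rw [List.append_assoc]; exact List.take_left
  have h2 : (p ++ tgt ++ r).drop (p.length + tgt.length) = r := by
    have hpt : p.length + tgt.length = (p ++ tgt).length := by simp
    rw [hpt]; exact List.drop_left
  rw [h1, h2]

theorem pv_elimLoop_noOcc (tgt : List Char) (htgt : tgt ≠ []) (l : List Char)
    (hno : ¬ tgt <:+: l) : pvElimLoop tgt htgt l = l := by
  rw [pvElimLoop.eq_def]
  rw [dif_pos ((PySem.Chars.find_eq_neg_one_iff l tgt).mpr hno)]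

theorem pv_main (tgt : List Char) (htgt : tgt ≠ []) (rest : List Char) :
    ∀ st : List Char, ¬ tgt <:+: st →
      List.foldl (pvStepL tgt) st rest = pvElimLoop tgt htgt (st ++ rest) := by
  induction rest with
  | nil =>
    intro st hno
    simp [pv_elimLoop_noOcc tgt htgt st hno]
  | cons c r ih =>
    intro st hno
    rw [List.foldl_cons]
    have hstep := pv_step_noOcc htgt hno c
    rw [ih _ hstep]
    unfold pvStepL at hstep ⊢
    split_ifs with hcond
    · -- a match: st ++ [c] = p ++ tgt, pop = delete the leftmost occurrence
      set p := (st ++ [c]).take ((st ++ [c]).length - tgt.length) with hp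
      have hsplit : st ++ [c] = p ++ tgt := by
        conv_lhs => rw [← List.take_append_drop ((st ++ [c]).length - tgt.length) (st ++ [c])]
        rw [hcond]
      have hdl : (p ++ tgt).dropLast = st := by
        rw [← hsplit]; simp
      have hre : st ++ c :: r = p ++ tgt ++ r := by
        rw [← hsplit]
        simp
      rw [hre, pv_elimLoop_step tgt htgt p r (by rw [hdl]; exact hno)]
    · congr 1
      simp

theorem pv_foldl_concat (l st : List Char) :
    List.foldl (fun (a : List Char) (c : Char) => a ++ [c]) st l = st ++ l := by
  induction l generalizing st with
  | nil => simp
  | cons c r ih => simp [ih]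

theorem pv_ofList_ne_empty {l : List Char} (h : l ≠ []) : String.ofList l ≠ "" := by
  intro hc
  have h2 : (String.ofList l).toList = l := by simp
  rw [hc] at h2
  simp at h2
  exact h h2

-- ===== VERDICT (by name: the statement is the Claim_ definition above) =====
theorem eliminate_substring_variation_spec : Claim_equal_eliminate_substring_variation := by
  intro s target _
  unfold Spec_eliminate_substring_variation
  unfold eliminate_substring_variation eliminate_substring_variation_alt
  by_cases h : target.toList = []
  · rw [dif_pos h]
    have hstack : List.foldl (fun (stack : List Char) (char : Char) =>
        let stack := stack ++ [char]
        if PySem.List.slice stack (some (-(target.toList.length : Int))) none = target.toList then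
          (List.range target.toList.length).foldl (fun st _ => st.dropLast) stack
        else stack) [] s.toList = s.toList := by
      have hfun : (fun (stack : List Char) (char : Char) =>
          let stack := stack ++ [char]
          if PySem.List.slice stack (some (-(target.toList.length : Int))) none = target.toList then
            (List.range target.toList.length).foldl (fun st _ => st.dropLast) stack
          else stack) = (fun (a : List Char) (c : Char) => a ++ [c]) := by
        funext st c
        simp [h]
      rw [hfun, pv_foldl_concat]
      simp
    simp only [hstack]
    by_cases hs : s.toList = []
    · simp [hs]
    · rw [if_pos (pv_ofList_ne_empty hs), if_pos hs]
  · rw [dif_neg h]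
    have hstack : List.foldl (fun (stack : List Char) (char : Char) =>
        let stack := stack ++ [char]
        if PySem.List.slice stack (some (-(target.toList.length : Int))) none = target.toList then
          (List.range target.toList.length).foldl (fun st _ => st.dropLast) stack
        else stack) [] s.toList = pvElimLoop target.toList h s.toList := by
      rw [pv_stepA_eq target.toList h]
      have := pv_main target.toList h s.toList [] (by
        intro hc
        exact h (List.eq_nil_of_infix_nil hc))
      simpa using this
    simp only [hstack]
    by_cases hr : pvElimLoop target.toList h s.toList = []
    · simp [hr]
    · rw [if_pos (pv_ofList_ne_empty hr), if_pos hr]
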